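-- pv_equiv track=rewrite | github.com/jejacobs23/osteo | Python_Programs/Make_sig_pathways_summary_file_by_VEP-consequences.py | climb_the_tree
-- ===== SOURCE A (Python) =====
-- def whos_yo_daddy(G, P):
--     L = []
--     for j in P:
--         for i in G:
--             if j in G[i]:
--                 if i not in L:
--                     L.append(i)
--     return(L)
--
-- def climb_the_tree(G, Pathways):
--     D = {}
--     for i in Pathways:
--         p = i
--         s = []
--         v = whos_yo_daddy(G=G, P=p)
--         while len(v) > 0:
--             for j in v:
--                 if j not in s:
--                     s.append(j)
--             v = whos_yo_daddy(G=G, P=v)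
--         n = ""
--         for t in Pathways:
--             if t in s:
--                 n += t + ","
--         n = n.rstrip(",")
--         if len(n) > 0:
--             D[i[0]] = " is embeded in pathway(s) " + n
--         else:
--             D[i[0]] = " is all alone."
--     return(D)
-- ===== SOURCE B (Python) =====
-- def climb_the_tree(G, Pathways):
--     # reverse adjacency: value string -> list of keys whose value list contains it
--     rev = {}
--     for i in G:
--         for x in G[i]:
--             rev.setdefault(x, []).append(i)
--     D = {}
--     for i in Pathways:
--         vset = set()
--         frontier = []
--         for c in i:
--             for p in rev.get(c, ()):
--                 if p not in vset:
--                     vset.add(p)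
--                     frontier.append(p)
--         while frontier:
--             nxt = []
--             for j in frontier:
--                 for p in rev.get(j, ()):
--                     if p not in vset:
--                         vset.add(p)
--                         nxt.append(p)
--             frontier = nxt
--         n = "".join(t + "," for t in Pathways if t in vset).rstrip(",")
--         D[i[0]] = " is embeded in pathway(s) " + n if n else " is all alone."
--     return D
-- ===== Notes on version B (the rewrite author's own statement) =====
-- stated objective: faster
-- what changed: A rescans every key of G for every frontier element at every level and recomputes the parents of the ENTIRE accumulated frontier each round; B builds a reverse-adjacency dict (value -> parent keys) once and runs a BFS upward that expands only newly discovered ancestors, tracked in a visited set.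
import Mathlib
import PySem

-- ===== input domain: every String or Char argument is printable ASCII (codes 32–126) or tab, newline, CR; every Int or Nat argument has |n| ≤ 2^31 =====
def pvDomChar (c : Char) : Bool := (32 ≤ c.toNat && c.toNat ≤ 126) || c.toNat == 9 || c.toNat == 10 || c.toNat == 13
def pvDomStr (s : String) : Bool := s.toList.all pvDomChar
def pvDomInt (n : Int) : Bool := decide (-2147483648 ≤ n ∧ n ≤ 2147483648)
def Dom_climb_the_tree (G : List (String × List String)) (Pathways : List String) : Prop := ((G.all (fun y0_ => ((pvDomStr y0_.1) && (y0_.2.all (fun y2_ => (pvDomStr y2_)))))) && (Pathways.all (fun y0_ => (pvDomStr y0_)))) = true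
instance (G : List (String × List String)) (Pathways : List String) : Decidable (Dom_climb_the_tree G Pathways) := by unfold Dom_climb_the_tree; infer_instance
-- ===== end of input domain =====

-- B replaces A's per-level rescan of the whole graph by a reverse-adjacency dict built once plus a
-- BFS over newly discovered ancestors only (visited set); same return value on every input Pre_ admits.

-- ===== PORT A =====
-- The Python parameter G is a dict; both ports read the association list through PySem.Dict.ofList.
def whos_yo_daddy (d : PySem.Dict String (List String)) (P : List String) : List String :=
  P.foldl (fun L j =>
    d.keys.foldl (fun L i =>
      if j ∈ d.getD i [] then (if i ∈ L then L else L ++ [i]) else L) L) []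

-- the 'while len(v) > 0' loop of A; fuel G.length + 2: under Pre_ the frontier provably empties
-- within G.length + 1 steps (outside Pre_ the Python loop never terminates)
def climbLoopA (d : PySem.Dict String (List String)) : Nat → List String → List String → List String
  | 0, s, _ => s
  | fuel+1, s, v =>
    if v.length > 0 then
      climbLoopA d fuel (v.foldl (fun s j => if j ∈ s then s else s ++ [j]) s) (whos_yo_daddy d v)
    else s

-- str.rstrip(",") ported by hand on the char list (exact: removes trailing ',' characters)
def pvRstripComma (cs : List Char) : List Char := (cs.reverse.dropWhile (fun c => c == ',')).reverse

def climb_the_tree (G : List (String × List String)) (Pathways : List String) : List (String × String) :=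
  let d := PySem.Dict.ofList G
  (Pathways.foldl (fun D i =>
    -- v = whos_yo_daddy(G=G, P=p): 'for j in P' iterates the CHARACTERS of the string p
    let v := whos_yo_daddy d (i.toList.map (fun c => String.singleton c))
    let s := climbLoopA d (G.length + 2) [] v
    let n := pvRstripComma (Pathways.foldl (fun n t => if t ∈ s then n ++ t.toList ++ [','] else n) [])
    match i.toList with
    | [] => D   -- Python raises IndexError at i[0]; excluded by Pre_
    | c :: _ =>
      if 0 < n.length then
        D.insert (String.singleton c) (String.ofList (" is embeded in pathway(s) ".toList ++ n))
      else
        D.insert (String.singleton c) " is all alone.") PySem.Dict.empty).items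

-- ===== PORT B =====
-- rev = {}; for i in G: for x in G[i]: rev.setdefault(x, []).append(i)
def pvRevAdj (G : List (String × List String)) : PySem.Dict String (List String) :=
  (PySem.Dict.ofList G).items.foldl (fun rev p =>
    p.2.foldl (fun rev x => rev.modify x [] (fun l => l ++ [p.1])) rev) PySem.Dict.empty

-- for j in js: for p in rev.get(j, ()): if p not in vset: vset.add(p); nxt.append(p)
def bfsRound (rev : PySem.Dict String (List String)) (st : PySem.Set String × List String)
    (js : List String) : PySem.Set String × List String :=
  js.foldl (fun st j =>
    (rev.getD j []).foldl (fun st p =>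
      if p ∈ st.1 then st else (PySem.Set.add st.1 p, st.2 ++ [p])) st) st

-- while frontier: …; the Python loop always terminates; fuel G.length + 2 is enough under Pre_
def bfsLoop (rev : PySem.Dict String (List String)) : Nat → PySem.Set String → List String → PySem.Set String
  | 0, vset, _ => vset
  | fuel+1, vset, frontier =>
    if frontier.isEmpty then vset
    else
      let st := bfsRound rev (vset, []) frontier
      bfsLoop rev fuel st.1 st.2

def climb_the_tree_alt (G : List (String × List String)) (Pathways : List String) : List (String × String) :=
  let rev := pvRevAdj G
  (Pathways.foldl (fun D i =>
    let st := bfsRound rev (PySem.Set.empty, []) (i.toList.map (fun c => String.singleton c))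
    let vset := bfsLoop rev (G.length + 2) st.1 st.2
    let n := pvRstripComma
      (((Pathways.filter (fun t => PySem.Set.contains vset t)).map (fun t => t.toList ++ [','])).flatten)
    match i.toList with
    | [] => D   -- Python raises IndexError at i[0]; excluded by Pre_
    | c :: _ =>
      D.insert (String.singleton c)
        (if 0 < n.length then String.ofList (" is embeded in pathway(s) ".toList ++ n)
         else " is all alone.")) PySem.Dict.empty).items

-- ===== PRECONDITION & SPEC =====
-- parents of j in the graph: the keys whose value list contains j
def pvParentsList (G : List (String × List String)) (j : String) : List String :=
  ((PySem.Dict.ofList G).items.filter (fun p => j ∈ p.2)).map (fun p => p.1)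

def pvGrow (G : List (String × List String)) (S : PySem.Set String) : PySem.Set String :=
  PySem.Set.update S (S.flatMap (pvParentsList G))

-- all nodes reachable upward (ancestors) from S, S included
def pvAnc (G : List (String × List String)) (S : List String) : PySem.Set String :=
  (pvGrow G)^[G.length + 1] (PySem.Set.ofList S)

def pvInitFrontier (G : List (String × List String)) (i : String) : List String :=
  i.toList.flatMap (fun c => pvParentsList G (String.singleton c))

-- Pre_ excludes exactly the inputs on which the Python A does not return: a pathway that is the empty
-- string (IndexError at i[0]) or a pathway one of whose ancestors lies on a cycle (A's while loop
-- then never terminates).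
def Pre_climb_the_tree (G : List (String × List String)) (Pathways : List String) : Prop :=
  "" ∉ Pathways ∧
  ∀ i ∈ Pathways, ∀ x ∈ pvAnc G (pvInitFrontier G i), x ∉ pvAnc G (pvParentsList G x)

instance (G : List (String × List String)) (Pathways : List String) :
    Decidable (Pre_climb_the_tree G Pathways) := by unfold Pre_climb_the_tree; infer_instance

def pvWitness_climb_the_tree : (List (String × List String)) × List String :=
  ([("ab", ["x"]), ("x", ["b"])], ["b", "x"])

def Spec_climb_the_tree (G : List (String × List String)) (Pathways : List String)
    (out : List (String × String)) : Prop := out = climb_the_tree_alt G Pathways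
instance (G : List (String × List String)) (Pathways : List String) (out : List (String × String)) :
    Decidable (Spec_climb_the_tree G Pathways out) := by unfold Spec_climb_the_tree; infer_instance

-- ===== CLAIM (what is proved, stated in full; the proofs are below) =====
def Claim_equal_climb_the_tree : Prop := ∀ (G : List (String × List String)) (Pathways : List String), Dom_climb_the_tree G Pathways → Pre_climb_the_tree G Pathways → Spec_climb_the_tree G Pathways (climb_the_tree G Pathways)

-- ===== LEMMAS AND PROOFS =====

-- the edge relation: x is a parent (direct ancestor) of j
def pvR (G : List (String × List String)) (j x : String) : Prop :=
  x ∈ (PySem.Dict.ofList G).keys ∧ j ∈ (PySem.Dict.ofList G).getD x []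

-- A's frontier iterated k times
def pvIter (G : List (String × List String)) (k : Nat) (v : List String) : List String :=
  (whos_yo_daddy (PySem.Dict.ofList G))^[k] v

theorem mem_condAdd_fold (K L : List String) (c : String → Prop) [DecidablePred c] (x : String) :
    x ∈ K.foldl (fun L i => if c i then (if i ∈ L then L else L ++ [i]) else L) L ↔
      x ∈ L ∨ (x ∈ K ∧ c x) := by
  induction K generalizing L with
  | nil => simp
  | cons a K ih =>
    simp only [List.foldl_cons, ih, List.mem_cons]
    by_cases hca : c a
    · simp only [if_pos hca]
      by_cases haL : a ∈ L
      · simp only [if_pos haL]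
        constructor
        · rintro (h | ⟨h, hc⟩)
          · exact Or.inl h
          · exact Or.inr ⟨Or.inr h, hc⟩
        · rintro (h | ⟨rfl | h, hc⟩)
          · exact Or.inl h
          · exact Or.inl haL
          · exact Or.inr ⟨h, hc⟩
      · simp only [if_neg haL]
        constructor
        · rintro (h | ⟨h, hc⟩)
          · rcases List.mem_append.mp h with h | h
            · exact Or.inl h
            · obtain rfl := List.mem_singleton.mp h
              exact Or.inr ⟨Or.inl rfl, hca⟩
          · exact Or.inr ⟨Or.inr h, hc⟩
        · rintro (h | ⟨rfl | h, hc⟩)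
          · exact Or.inl (List.mem_append.mpr (Or.inl h))
          · exact Or.inl (List.mem_append.mpr (Or.inr (List.mem_singleton.mpr rfl)))
          · exact Or.inr ⟨h, hc⟩
    · simp only [if_neg hca]
      constructor
      · rintro (h | ⟨h, hc⟩)
        · exact Or.inl h
        · exact Or.inr ⟨Or.inr h, hc⟩
      · rintro (h | ⟨rfl | h, hc⟩)
        · exact Or.inl h
        · exact absurd hc hca
        · exact Or.inr ⟨h, hc⟩

theorem mem_daddy (G : List (String × List String)) (P : List String) (x : String) :
    x ∈ whos_yo_daddy (PySem.Dict.ofList G) P ↔ ∃ j ∈ P, pvR G j x := by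
  unfold whos_yo_daddy
  suffices h : ∀ L, x ∈ P.foldl (fun L j => (PySem.Dict.ofList G).keys.foldl
      (fun L i => if j ∈ (PySem.Dict.ofList G).getD i [] then (if i ∈ L then L else L ++ [i]) else L) L) L ↔
      x ∈ L ∨ ∃ j ∈ P, pvR G j x by
    rw [h []]; simp
  induction P with
  | nil => simp
  | cons a P ih =>
    intro L
    simp only [List.foldl_cons, ih, mem_condAdd_fold]
    unfold pvR
    constructor
    · rintro ((h | h) | h)
      · exact Or.inl h
      · exact Or.inr ⟨a, List.mem_cons_self .., ⟨h.1, h.2⟩⟩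
      · obtain ⟨j, hj, hr⟩ := h
        exact Or.inr ⟨j, List.mem_cons_of_mem _ hj, hr⟩
    · rintro (h | ⟨j, hj, hr⟩)
      · exact Or.inl (Or.inl h)
      · rcases List.mem_cons.mp hj with rfl | hj
        · exact Or.inl (Or.inr ⟨hr.1, hr.2⟩)
        · exact Or.inr ⟨j, hj, hr⟩

theorem mem_parentsList (G : List (String × List String)) (j x : String) :
    x ∈ pvParentsList G j ↔ pvR G j x := by
  unfold pvParentsList pvR
  have hnd := PySem.Dict.nodup_keys_ofList G
  constructor
  · intro h
    simp only [List.mem_map, List.mem_filter] at h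
    obtain ⟨p, ⟨hpi, hjv⟩, rfl⟩ := h
    refine ⟨PySem.Dict.mem_keys_of_mem_items _ hpi, ?_⟩
    have : (PySem.Dict.ofList G).getD p.1 [] = p.2 :=
      PySem.Dict.getD_of_mem_items _ (by exact hpi) hnd []
    rw [this]; simpa using hjv
  · rintro ⟨hk, hv⟩
    rcases h : (PySem.Dict.ofList G).get? x with _ | v
    · exact absurd ((PySem.Dict.get?_eq_none_iff_not_mem_keys _ _).mp h) (by simpa using hk)
    · have hmem : (x, v) ∈ (PySem.Dict.ofList G).items :=
        (PySem.Dict.get?_eq_some_iff_mem_items _ _ _ hnd).mp h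
      have hgd : (PySem.Dict.ofList G).getD x [] = v :=
        PySem.Dict.getD_of_mem_items _ hmem hnd []
      rw [hgd] at hv
      simp only [List.mem_map, List.mem_filter]
      exact ⟨(x, v), ⟨hmem, by simpa using hv⟩, rfl⟩

theorem keys_length_le (G : List (String × List String)) :
    (PySem.Dict.ofList G).keys.length ≤ G.length := by
  have : (PySem.Dict.ofList G).keys = PySem.Set.ofList (G.map (fun p => p.1)) := by
    show (List.foldl (fun acc p => acc.insert p.1 p.2) PySem.Dict.empty G).keys = _
    have := PySem.Dict.keys_foldl_insert_key (ν := List String) G (fun p => p.1)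
      (fun _ p => p.2) PySem.Dict.empty
    simpa [PySem.Set.update_nil_left] using this
  rw [this]
  calc (PySem.Set.ofList (G.map (fun p => p.1))).length ≤ (G.map (fun p => p.1)).length :=
        PySem.Set.length_ofList_le _
    _ = G.length := List.length_map ..

theorem mem_rev_getD (G : List (String × List String)) (j p : String) :
    p ∈ (pvRevAdj G).getD j [] ↔ pvR G j p := by
  have hrw : pvRevAdj G = ((PySem.Dict.ofList G).items.flatMap
      (fun q => q.2.map (fun x => (x, q.1)))).foldl
      (fun rev q => rev.modify q.1 [] (fun l => l ++ [q.2])) PySem.Dict.empty := by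
    unfold pvRevAdj
    rw [List.foldl_flatMap]
    congr 1
    funext rev q
    rw [List.foldl_map]
  have hnd := PySem.Dict.nodup_keys_ofList G
  rw [hrw, PySem.Dict.getD_foldl_modify_append]
  simp only [PySem.Dict.getD_empty, List.nil_append, List.mem_map, List.mem_filter,
    List.mem_flatMap]
  constructor
  · rintro ⟨q, ⟨⟨pr, hpr, hq⟩, hq1⟩, rfl⟩
    obtain ⟨xx, hxx, rfl⟩ := hq
    simp only [beq_iff_eq] at hq1
    subst hq1
    refine ⟨PySem.Dict.mem_keys_of_mem_items _ hpr, ?_⟩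
    have hgd : (PySem.Dict.ofList G).getD pr.1 [] = pr.2 :=
      PySem.Dict.getD_of_mem_items _ (by exact hpr) hnd []
    rw [hgd]; exact hxx
  · rintro ⟨hk, hv⟩
    rcases h : (PySem.Dict.ofList G).get? p with _ | v
    · exact absurd ((PySem.Dict.get?_eq_none_iff_not_mem_keys _ _).mp h) (by simpa using hk)
    · have hmem : (p, v) ∈ (PySem.Dict.ofList G).items :=
        (PySem.Dict.get?_eq_some_iff_mem_items _ _ _ hnd).mp h
      have hgd : (PySem.Dict.ofList G).getD p [] = v :=
        PySem.Dict.getD_of_mem_items _ hmem hnd []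
      rw [hgd] at hv
      exact ⟨(j, p), ⟨⟨(p, v), hmem, ⟨j, hv, rfl⟩⟩, by simp⟩, rfl⟩

-- iterated frontier lemmas
theorem pvIter_succ (G : List (String × List String)) (k : Nat) (v : List String) :
    pvIter G (k+1) v = pvIter G k (whos_yo_daddy (PySem.Dict.ofList G) v) :=
  Function.iterate_succ_apply ..

theorem pvIter_succ' (G : List (String × List String)) (k : Nat) (v : List String) :
    pvIter G (k+1) v = whos_yo_daddy (PySem.Dict.ofList G) (pvIter G k v) :=
  Function.iterate_succ_apply' ..

theorem pvIter_mono (G : List (String × List String)) (k : Nat) :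
    ∀ {S T : List String}, (∀ p ∈ S, p ∈ T) → ∀ x ∈ pvIter G k S, x ∈ pvIter G k T := by
  induction k with
  | zero => intro S T h x hx; exact h x hx
  | succ k ih =>
    intro S T h x hx
    rw [pvIter_succ] at hx ⊢
    refine ih (fun p hp => ?_) x hx
    rw [mem_daddy] at hp ⊢
    obtain ⟨j, hj, hr⟩ := hp
    exact ⟨j, h j hj, hr⟩

theorem pvIter_eq_nil_of_sub (G : List (String × List String)) (k : Nat) {S T : List String}
    (h : ∀ p ∈ S, p ∈ T) (hT : pvIter G k T = []) : pvIter G k S = [] := by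
  rw [List.eq_nil_iff_forall_not_mem]
  intro x hx
  have := pvIter_mono G k h x hx
  rw [hT] at this
  simp at this

-- characterization of A's while loop
theorem mem_collect_fold (v s : List String) (x : String) :
    x ∈ v.foldl (fun s j => if j ∈ s then s else s ++ [j]) s ↔ x ∈ s ∨ x ∈ v := by
  have : v.foldl (fun s j => if j ∈ s then s else s ++ [j]) s = PySem.Set.update s v := by
    show _ = v.foldl PySem.Set.add s
    congr 1
    funext s j
    rw [PySem.Set.add_eq_ite]
  rw [this]
  exact PySem.Set.mem_update s v x

theorem climbLoopA_char (G : List (String × List String)) :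
    ∀ (fuel : Nat) (s v : List String), (∃ k ≤ fuel, pvIter G k v = []) →
    ∀ x, x ∈ climbLoopA (PySem.Dict.ofList G) fuel s v ↔
      x ∈ s ∨ ∃ c ∈ v, Relation.ReflTransGen (pvR G) c x := by
  intro fuel
  induction fuel with
  | zero =>
    rintro s v ⟨k, hk, hnil⟩ x
    interval_cases k
    simp only [pvIter, Function.iterate_zero, id_eq] at hnil
    subst hnil
    simp [climbLoopA]
  | succ fuel ih =>
    rintro s v ⟨k, hk, hnil⟩ x
    by_cases hv : v = []
    · subst hv
      simp [climbLoopA]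
    · have hvlen : 0 < v.length := List.length_pos_iff.mpr hv
      rw [show climbLoopA (PySem.Dict.ofList G) (fuel+1) s v =
        climbLoopA (PySem.Dict.ofList G) fuel
          (v.foldl (fun s j => if j ∈ s then s else s ++ [j]) s)
          (whos_yo_daddy (PySem.Dict.ofList G) v) by simp [climbLoopA, hvlen]]
      -- transfer the termination bound
      obtain ⟨k', rfl⟩ : ∃ k', k = k' + 1 := by
        rcases k with _ | k'
        · exfalso
          simp only [pvIter, Function.iterate_zero, id_eq] at hnil
          exact hv hnil
        · exact ⟨k', rfl⟩
      rw [pvIter_succ] at hnil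
      rw [ih _ _ ⟨k', by omega, hnil⟩ x, mem_collect_fold]
      constructor
      · rintro ((h | h) | ⟨c, hc, hrtg⟩)
        · exact Or.inl h
        · exact Or.inr ⟨x, h, Relation.ReflTransGen.refl⟩
        · obtain ⟨j, hj, hr⟩ := (mem_daddy G v c).mp hc
          exact Or.inr ⟨j, hj, Relation.ReflTransGen.head hr hrtg⟩
      · rintro (h | ⟨c, hc, hrtg⟩)
        · exact Or.inl (Or.inl h)
        · rcases Relation.ReflTransGen.cases_head hrtg with rfl | ⟨y, hy, hrtg'⟩
          · exact Or.inl (Or.inr hc)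
          · exact Or.inr ⟨y, (mem_daddy G v y).mpr ⟨c, hc, hy⟩, hrtg'⟩

-- bfsRound: appends the same fresh elements to the visited set and to nxt
theorem addFold_spec :
    ∀ (ps v nx : List String),
    ∃ add, ps.foldl (fun (st : PySem.Set String × List String) p =>
        if p ∈ st.1 then st else (PySem.Set.add st.1 p, st.2 ++ [p])) (v, nx) =
        (v ++ add, nx ++ add) ∧
      (∀ p ∈ add, p ∉ v ∧ p ∈ ps) ∧ (∀ p ∈ ps, p ∈ v ++ add) := by
  intro ps
  induction ps with
  | nil => exact fun v nx => ⟨[], by simp⟩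
  | cons p ps ih =>
    intro v nx
    by_cases hp : p ∈ v
    · obtain ⟨add, heq, h1, h2⟩ := ih v nx
      refine ⟨add, ?_, ?_, ?_⟩
      · simpa [hp] using heq
      · exact fun q hq => ⟨(h1 q hq).1, List.mem_cons_of_mem _ (h1 q hq).2⟩
      · intro q hq
        rcases List.mem_cons.mp hq with rfl | hq
        · exact List.mem_append.mpr (Or.inl hp)
        · exact h2 q hq
    · obtain ⟨add, heq, h1, h2⟩ := ih (v ++ [p]) (nx ++ [p])
      refine ⟨p :: add, ?_, ?_, ?_⟩
      · have : (PySem.Set.add v p, nx ++ [p]) = ((v ++ [p] : List String), nx ++ [p]) := by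
          rw [PySem.Set.add_of_not_mem hp]
        simp only [List.foldl_cons, if_neg hp, this, heq, List.append_assoc,
          List.singleton_append]
      · intro q hq
        rcases List.mem_cons.mp hq with rfl | hq
        · exact ⟨hp, List.mem_cons_self ..⟩
        · refine ⟨fun hqv => (h1 q hq).1 (List.mem_append.mpr (Or.inl hqv)),
            List.mem_cons_of_mem _ (h1 q hq).2⟩
      · intro q hq
        rcases List.mem_cons.mp hq with rfl | hq
        · simp
        · have := h2 q hq
          simpa [List.mem_append, List.mem_cons, or_assoc] using this

theorem bfsRound_spec (G : List (String × List String)) (js : List String)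
    (v nx : List String) :
    ∃ add, bfsRound (pvRevAdj G) (v, nx) js = (v ++ add, nx ++ add) ∧
      (∀ p ∈ add, p ∉ v ∧ ∃ j ∈ js, pvR G j p) ∧
      (∀ j ∈ js, ∀ p, pvR G j p → p ∈ v ++ add) := by
  have hrw : bfsRound (pvRevAdj G) (v, nx) js =
      (js.flatMap (fun j => (pvRevAdj G).getD j [])).foldl
        (fun (st : PySem.Set String × List String) p =>
          if p ∈ st.1 then st else (PySem.Set.add st.1 p, st.2 ++ [p])) (v, nx) := by
    unfold bfsRound
    rw [List.foldl_flatMap]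
  obtain ⟨add, heq, h1, h2⟩ := addFold_spec (js.flatMap (fun j => (pvRevAdj G).getD j [])) v nx
  refine ⟨add, hrw ▸ heq, ?_, ?_⟩
  · intro p hp
    obtain ⟨hnv, hmem⟩ := h1 p hp
    obtain ⟨j, hj, hpj⟩ := List.mem_flatMap.mp hmem
    exact ⟨hnv, j, hj, (mem_rev_getD G j p).mp hpj⟩
  · intro j hj p hr
    exact h2 p (List.mem_flatMap.mpr ⟨j, hj, (mem_rev_getD G j p).mpr hr⟩)

-- characterization of B's BFS loop
theorem bfsLoop_char (G : List (String × List String)) :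
    ∀ (fuel : Nat) (vset frontier : List String),
    (∀ p ∈ frontier, p ∈ vset) →
    (∀ x ∈ vset, x ∉ frontier → ∀ y, pvR G x y → y ∈ vset) →
    (∃ k ≤ fuel, pvIter G k frontier = []) →
    ∀ z, z ∈ bfsLoop (pvRevAdj G) fuel vset frontier ↔
      z ∈ vset ∨ ∃ c ∈ frontier, Relation.TransGen (pvR G) c z := by
  intro fuel
  induction fuel with
  | zero =>
    rintro vset frontier hfr hcl ⟨k, hk, hnil⟩ z
    interval_cases k
    simp only [pvIter, Function.iterate_zero, id_eq] at hnil
    subst hnil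
    simp [bfsLoop]
  | succ fuel ih =>
    rintro vset frontier hfr hcl ⟨k, hk, hnil⟩ z
    by_cases hv : frontier = []
    · subst hv
      simp [bfsLoop]
    · rw [show bfsLoop (pvRevAdj G) (fuel+1) vset frontier = bfsLoop (pvRevAdj G) fuel
          (bfsRound (pvRevAdj G) (vset, []) frontier).1
          (bfsRound (pvRevAdj G) (vset, []) frontier).2 by
        simp [bfsLoop, List.isEmpty_iff, hv]]
      obtain ⟨add, heq, h1, h2⟩ := bfsRound_spec G frontier vset []
      rw [heq]
      simp only [List.nil_append]
      have claimC : ∀ y z', y ∈ vset ++ add → Relation.ReflTransGen (pvR G) y z' →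
          z' ∈ vset ++ add ∨ ∃ c ∈ add, Relation.TransGen (pvR G) c z' := by
        intro y z' hy hrtg
        revert hy
        refine Relation.ReflTransGen.head_induction_on hrtg (fun hz => Or.inl hz) ?_
        rintro a b hab hbz ihb ha
        rcases List.mem_append.mp ha with ha' | ha'
        · by_cases haf : a ∈ frontier
          · exact ihb (h2 a haf b hab)
          · exact ihb (List.mem_append.mpr (Or.inl (hcl a ha' haf b hab)))
        · exact Or.inr ⟨a, ha', Relation.TransGen.head' hab hbz⟩
      have hterm' : ∃ k' ≤ fuel, pvIter G k' add = [] := by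
        obtain ⟨k', rfl⟩ : ∃ k', k = k' + 1 := by
          rcases k with _ | k'
          · exfalso
            simp only [pvIter, Function.iterate_zero, id_eq] at hnil
            exact hv hnil
          · exact ⟨k', rfl⟩
        rw [pvIter_succ] at hnil
        refine ⟨k', by omega, pvIter_eq_nil_of_sub G k' (fun p hp => ?_) hnil⟩
        obtain ⟨j, hj, hr⟩ := (h1 p hp).2
        exact (mem_daddy G frontier p).mpr ⟨j, hj, hr⟩
      rw [ih (vset ++ add) add (fun p hp => List.mem_append.mpr (Or.inr hp))
        (fun x hx hxa y hr => ?hcl') hterm' z]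
      case hcl' =>
        rcases List.mem_append.mp hx with hx' | hx'
        · by_cases hxf : x ∈ frontier
          · exact h2 x hxf y hr
          · exact List.mem_append.mpr (Or.inl (hcl x hx' hxf y hr))
        · exact absurd hx' hxa
      constructor
      · rintro (h | ⟨c, hc, htg⟩)
        · rcases List.mem_append.mp h with h' | h'
          · exact Or.inl h'
          · obtain ⟨j, hj, hr⟩ := (h1 z h').2
            exact Or.inr ⟨j, hj, Relation.TransGen.single hr⟩
        · obtain ⟨j, hj, hr⟩ := (h1 c hc).2
          exact Or.inr ⟨j, hj, Relation.TransGen.head hr htg⟩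
      · rintro (h | ⟨c, hcf, htg⟩)
        · exact Or.inl (List.mem_append.mpr (Or.inl h))
        · exact claimC c z (List.mem_append.mpr (Or.inl (hfr c hcf)))
            htg.to_reflTransGen


-- ancestor-closure (pvAnc) lemmas, used to read the precondition
theorem mem_grow (G : List (String × List String)) (S : PySem.Set String) (x : String) :
    x ∈ pvGrow G S ↔ x ∈ S ∨ ∃ j ∈ S, pvR G j x := by
  unfold pvGrow
  rw [PySem.Set.mem_update]
  simp only [List.mem_flatMap, mem_parentsList]

theorem grow_append (G : List (String × List String)) (S : PySem.Set String) :
    ∃ rest, pvGrow G S = S ++ rest :=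
  ⟨_, PySem.Set.update_eq_append_filter _ _⟩

theorem iterGrow_mono_mem (G : List (String × List String)) (m : Nat) :
    ∀ (S : PySem.Set String) (x : String), x ∈ S → x ∈ (pvGrow G)^[m] S := by
  induction m with
  | zero => intro S x hx; simpa using hx
  | succ m ih =>
    intro S x hx
    rw [Function.iterate_succ_apply]
    obtain ⟨rest, hr⟩ := grow_append G S
    exact ih _ x (by rw [hr]; exact List.mem_append.mpr (Or.inl hx))

theorem iterGrow_nodup (G : List (String × List String)) (m : Nat)
    (S : PySem.Set String) (h : S.Nodup) : ((pvGrow G)^[m] S).Nodup := by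
  induction m with
  | zero => simpa using h
  | succ m ih =>
    rw [Function.iterate_succ_apply']
    exact PySem.Set.nodup_update _ _ ih

theorem iterGrow_subset (G : List (String × List String)) (m : Nat)
    (S : PySem.Set String) :
    ∀ x ∈ (pvGrow G)^[m] S, x ∈ S ++ (PySem.Dict.ofList G).keys := by
  induction m with
  | zero => intro x hx; exact List.mem_append.mpr (Or.inl (by simpa using hx))
  | succ m ih =>
    intro x hx
    rw [Function.iterate_succ_apply'] at hx
    rcases (mem_grow G _ x).mp hx with hx' | ⟨j, _, hr⟩
    · exact ih x hx'
    · exact List.mem_append.mpr (Or.inr hr.1)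

theorem iterGrow_stable (G : List (String × List String)) (S : PySem.Set String) (k : Nat)
    (h : (pvGrow G)^[k+1] S = (pvGrow G)^[k] S) :
    ∀ m, k ≤ m → (pvGrow G)^[m] S = (pvGrow G)^[k] S := by
  intro m hm
  induction m with
  | zero =>
    have hk0 : k = 0 := by omega
    subst hk0; rfl
  | succ m ih =>
    rcases Nat.lt_or_ge k (m+1) with hlt | hge
    · have hkm : k ≤ m := by omega
      have h2 : pvGrow G ((pvGrow G)^[k] S) = (pvGrow G)^[k] S := by
        rw [← Function.iterate_succ_apply' (pvGrow G) k S]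
        exact h
      rw [Function.iterate_succ_apply', ih hkm, h2]
    · have : k = m + 1 := by omega
      rw [this]

theorem growth_count (G : List (String × List String)) (S : PySem.Set String) (m : Nat)
    (h : ∀ k < m, (pvGrow G)^[k+1] S ≠ (pvGrow G)^[k] S) :
    S.length + m ≤ ((pvGrow G)^[m] S).length := by
  induction m with
  | zero => simp
  | succ m ih =>
    have hm : S.length + m ≤ ((pvGrow G)^[m] S).length := ih (fun k hk => h k (by omega))
    obtain ⟨rest, hr⟩ := grow_append G ((pvGrow G)^[m] S)
    have hne := h m (by omega)
    rw [Function.iterate_succ_apply', hr]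
    rcases rest with _ | ⟨r, rest⟩
    · exfalso
      apply hne
      rw [Function.iterate_succ_apply', hr, List.append_nil]
    · simp only [List.length_append, List.length_cons]
      omega

theorem exists_fix (G : List (String × List String)) (S : List String) :
    ∃ k ≤ G.length, (pvGrow G)^[k+1] (PySem.Set.ofList S) = (pvGrow G)^[k] (PySem.Set.ofList S) := by
  by_contra hcon
  push Not at hcon
  have hgr := growth_count G (PySem.Set.ofList S) (G.length + 1)
    (fun k hk => hcon k (by omega))
  set S0 := PySem.Set.ofList S with hS0
  have hnd : ((pvGrow G)^[G.length+1] S0).Nodup :=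
    iterGrow_nodup G _ _ (PySem.Set.nodup_ofList S)
  have hsub := iterGrow_subset G (G.length+1) S0
  have hlen : ((pvGrow G)^[G.length+1] S0).length ≤ (S0 ++ (PySem.Dict.ofList G).keys).length := by
    rw [← List.toFinset_card_of_nodup hnd]
    calc ((pvGrow G)^[G.length+1] S0).toFinset.card
        ≤ (S0 ++ (PySem.Dict.ofList G).keys).toFinset.card := by
          apply Finset.card_le_card
          intro a ha
          rw [List.mem_toFinset] at ha ⊢
          exact hsub a ha
      _ ≤ (S0 ++ (PySem.Dict.ofList G).keys).length := List.toFinset_card_le _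
  have hkl := keys_length_le G
  simp only [List.length_append] at hlen
  omega

theorem anc_closed (G : List (String × List String)) (S : List String) :
    pvGrow G (pvAnc G S) = pvAnc G S := by
  obtain ⟨k, hk, hfix⟩ := exists_fix G S
  unfold pvAnc
  have h1 := iterGrow_stable G (PySem.Set.ofList S) k hfix (G.length + 1) (by omega)
  rw [Function.iterate_succ_apply' (pvGrow G) k (PySem.Set.ofList S)] at hfix
  rw [h1]
  exact hfix

theorem anc_complete (G : List (String × List String)) (S : List String) {c x : String}
    (hc : c ∈ S) (h : Relation.ReflTransGen (pvR G) c x) : x ∈ pvAnc G S := by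
  induction h with
  | refl => exact iterGrow_mono_mem G _ _ c ((PySem.Set.mem_ofList S c).mpr hc)
  | tail _hab hbx ih =>
    have : _ ∈ pvGrow G (pvAnc G S) := (mem_grow G _ _).mpr (Or.inr ⟨_, ih, hbx⟩)
    rwa [anc_closed] at this

-- chains out of the iterated frontier, for the termination argument
theorem iter_chain (G : List (String × List String)) :
    ∀ (k : Nat) (v : List String) (x : String), x ∈ pvIter G k v →
    ∃ c₀ t, c₀ ∈ v ∧ List.IsChain (pvR G) (c₀ :: t) ∧
      (c₀ :: t).getLast? = some x ∧ t.length = k := by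
  intro k
  induction k with
  | zero =>
    intro v x hx
    exact ⟨x, [], hx, List.isChain_singleton x, rfl, rfl⟩
  | succ k ih =>
    intro v x hx
    rw [pvIter_succ'] at hx
    obtain ⟨j, hj, hr⟩ := (mem_daddy G _ x).mp hx
    obtain ⟨c₀, t, hc, hch, hlast, hlen⟩ := ih v j hj
    refine ⟨c₀, t ++ [x], hc, ?_, ?_, by simp [hlen]⟩
    · rw [show c₀ :: (t ++ [x]) = (c₀ :: t) ++ [x] from rfl]
      refine hch.append (List.isChain_singleton x) ?_
      intro a ha b hb
      rw [hlast] at ha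
      simp only [Option.mem_some_iff] at ha
      simp only [List.head?_cons, Option.mem_some_iff] at hb
      subst ha; subst hb
      exact hr
    · rw [show c₀ :: (t ++ [x]) = (c₀ :: t) ++ [x] from rfl, List.getLast?_concat]

theorem chain_mem_keys (G : List (String × List String)) :
    ∀ (t : List String) (a : String), List.IsChain (pvR G) (a :: t) →
    ∀ y ∈ t, y ∈ (PySem.Dict.ofList G).keys := by
  intro t
  induction t with
  | nil => intro a _ y hy; simp at hy
  | cons b t ih =>
    intro a hch y hy
    obtain ⟨hab, hbt⟩ := List.isChain_cons_cons.mp hch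
    rcases List.mem_cons.mp hy with rfl | hy
    · exact hab.1
    · exact ih b hbt y hy

theorem not_nodup_split :
    ∀ (l : List String), ¬ l.Nodup → ∃ l1 y l2 l3, l = l1 ++ y :: (l2 ++ y :: l3) := by
  intro l
  induction l with
  | nil => intro h; exact absurd List.nodup_nil h
  | cons a l ih =>
    intro h
    by_cases hal : a ∈ l
    · obtain ⟨s, t, rfl⟩ := List.append_of_mem hal
      exact ⟨[], a, s, t, rfl⟩
    · have hnl : ¬ l.Nodup := fun hn => h (List.nodup_cons.mpr ⟨hal, hn⟩)
      obtain ⟨l1, y, l2, l3, rfl⟩ := ih hnl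
      exact ⟨a :: l1, y, l2, l3, rfl⟩

theorem chain_TG (G : List (String × List String)) :
    ∀ (t : List String) (a b : String), List.IsChain (pvR G) (a :: (t ++ [b])) →
    Relation.TransGen (pvR G) a b := by
  intro t
  induction t with
  | nil =>
    intro a b hch
    exact Relation.TransGen.single (List.isChain_cons_cons.mp hch).1
  | cons c t ih =>
    intro a b hch
    obtain ⟨hac, hct⟩ := List.isChain_cons_cons.mp hch
    exact Relation.TransGen.head hac (ih c b hct)

theorem chain_prefix_RTG (G : List (String × List String)) :
    ∀ (t : List String) (a y : String), List.IsChain (pvR G) (a :: t) → y ∈ a :: t →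
    Relation.ReflTransGen (pvR G) a y := by
  intro t
  induction t with
  | nil =>
    intro a y _ hy
    obtain rfl : y = a := by simpa using hy
    exact Relation.ReflTransGen.refl
  | cons b t ih =>
    intro a y hch hy
    rcases List.mem_cons.mp hy with rfl | hy
    · exact Relation.ReflTransGen.refl
    · obtain ⟨hab, hbt⟩ := List.isChain_cons_cons.mp hch
      exact Relation.ReflTransGen.head hab (ih b y hbt hy)

-- under Pre_, A's frontier iterates empty within G.length + 1 steps
theorem iter_empties (G : List (String × List String)) (Pathways : List String)
    (hPre : Pre_climb_the_tree G Pathways) (i : String) (hi : i ∈ Pathways) :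
    pvIter G (G.length + 1)
      (whos_yo_daddy (PySem.Dict.ofList G) (i.toList.map (fun c => String.singleton c))) = [] := by
  by_contra h
  obtain ⟨x, hx⟩ := List.exists_mem_of_ne_nil _ h
  obtain ⟨c₀, t, hc0, hch, _hlast, hlen⟩ := iter_chain G (G.length+1) _ x hx
  have hc0k : c₀ ∈ (PySem.Dict.ofList G).keys := by
    obtain ⟨j, _, hr⟩ := (mem_daddy G _ c₀).mp hc0
    exact hr.1
  have hsub : ∀ y ∈ c₀ :: t, y ∈ (PySem.Dict.ofList G).keys := by
    intro y hy
    rcases List.mem_cons.mp hy with rfl | hy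
    · exact hc0k
    · exact chain_mem_keys G t c₀ hch y hy
  have hnodup : ¬ (c₀ :: t).Nodup := by
    intro hnd
    have h1 : (c₀ :: t).length ≤ (PySem.Dict.ofList G).keys.length := by
      rw [← List.toFinset_card_of_nodup hnd]
      calc (c₀ :: t).toFinset.card ≤ (PySem.Dict.ofList G).keys.toFinset.card := by
            apply Finset.card_le_card
            intro a ha
            rw [List.mem_toFinset] at ha ⊢
            exact hsub a ha
        _ ≤ (PySem.Dict.ofList G).keys.length := List.toFinset_card_le _
    have h2 := keys_length_le G
    simp only [List.length_cons, hlen] at h1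
    omega
  obtain ⟨l1, y, l2, l3, hdec⟩ := not_nodup_split _ hnodup
  have hch2 := hch
  rw [hdec] at hch2
  obtain ⟨-, hch3, -⟩ := List.isChain_append.mp hch2
  rw [show (y : String) :: (l2 ++ y :: l3) = (y :: l2) ++ (y :: l3) by simp] at hch3
  obtain ⟨hA1, -, hlink⟩ := List.isChain_append.mp hch3
  have hch4 : List.IsChain (pvR G) ((y :: l2) ++ [y]) :=
    hA1.append (List.isChain_singleton y) (by
      intro a ha b hb
      simp only [List.head?_cons, Option.mem_some_iff] at hb
      subst hb
      exact hlink a ha y (by simp))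
  have htg : Relation.TransGen (pvR G) y y := chain_TG G l2 y y hch4
  have hymem : y ∈ c₀ :: t := by
    rw [hdec]
    simp
  have hrtg : Relation.ReflTransGen (pvR G) c₀ y := chain_prefix_RTG G t c₀ y hch hymem
  have hc0init : c₀ ∈ pvInitFrontier G i := by
    obtain ⟨j, hj, hr⟩ := (mem_daddy G _ c₀).mp hc0
    obtain ⟨ch, hch', rfl⟩ := List.mem_map.mp hj
    exact List.mem_flatMap.mpr ⟨ch, hch', (mem_parentsList G _ c₀).mpr hr⟩
  have hyanc : y ∈ pvAnc G (pvInitFrontier G i) := anc_complete G _ hc0init hrtg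
  obtain ⟨w, hw, hwy⟩ := Relation.TransGen.head'_iff.mp htg
  have hycyc : y ∈ pvAnc G (pvParentsList G y) :=
    anc_complete G _ ((mem_parentsList G y w).mpr hw) hwy
  exact hPre.2 i hi y hyanc hycyc

-- the accumulated message string is the same fold over equal membership conditions
theorem strfold_eq (P : List String) (S1 S2 : List String) (h : ∀ t, t ∈ S1 ↔ t ∈ S2) :
    ∀ acc, P.foldl (fun n t => if t ∈ S1 then n ++ t.toList ++ [','] else n) acc =
      acc ++ ((P.filter (fun t => PySem.Set.contains S2 t)).map (fun t => t.toList ++ [','])).flatten := by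
  induction P with
  | nil => intro acc; simp
  | cons a P ih =>
    intro acc
    simp only [List.foldl_cons, List.filter_cons]
    by_cases ha : a ∈ S1
    · have hc : PySem.Set.contains S2 a = true := (PySem.Set.contains_iff ..).mpr ((h a).mp ha)
      rw [if_pos ha, hc, if_pos rfl]
      rw [ih]
      simp [List.append_assoc]
    · have hc : PySem.Set.contains S2 a = false := by
        rcases hb : PySem.Set.contains S2 a with _ | _
        · rfl
        · exact absurd ((h a).mpr ((PySem.Set.contains_iff ..).mp hb)) ha
      rw [if_neg ha, hc]
      simp only [Bool.false_eq_true, if_false]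
      exact ih acc

-- the two per-pathway loop bodies agree
theorem per_path_eq (G : List (String × List String)) (Pathways : List String)
    (hPre : Pre_climb_the_tree G Pathways) (i : String) (hi : i ∈ Pathways)
    (D : PySem.Dict String String) :
    (let d := PySem.Dict.ofList G
     let v := whos_yo_daddy d (i.toList.map (fun c => String.singleton c))
     let s := climbLoopA d (G.length + 2) [] v
     let n := pvRstripComma (Pathways.foldl (fun n t => if t ∈ s then n ++ t.toList ++ [','] else n) [])
     match i.toList with
     | [] => D
     | c :: _ =>
       if 0 < n.length then
         D.insert (String.singleton c) (String.ofList (" is embeded in pathway(s) ".toList ++ n))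
       else
         D.insert (String.singleton c) " is all alone.") =
    (let rev := pvRevAdj G
     let st := bfsRound rev (PySem.Set.empty, []) (i.toList.map (fun c => String.singleton c))
     let vset := bfsLoop rev (G.length + 2) st.1 st.2
     let n := pvRstripComma
       (((Pathways.filter (fun t => PySem.Set.contains vset t)).map (fun t => t.toList ++ [','])).flatten)
     match i.toList with
     | [] => D
     | c :: _ =>
       D.insert (String.singleton c)
         (if 0 < n.length then String.ofList (" is embeded in pathway(s) ".toList ++ n)
          else " is all alone.")) := by
  set chars := i.toList.map (fun c => String.singleton c) with hchars
  set v0 := whos_yo_daddy (PySem.Dict.ofList G) chars with hv0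
  have hk : pvIter G (G.length + 1) v0 = [] := iter_empties G Pathways hPre i hi
  have hA : ∀ z, z ∈ climbLoopA (PySem.Dict.ofList G) (G.length+2) [] v0 ↔
      ∃ c ∈ v0, Relation.ReflTransGen (pvR G) c z := by
    intro z
    rw [climbLoopA_char G (G.length+2) [] v0 ⟨G.length+1, by omega, hk⟩ z]
    simp
  obtain ⟨add, heq, h1, h2⟩ := bfsRound_spec G chars [] []
  have heq' : bfsRound (pvRevAdj G) (PySem.Set.empty, []) chars = (add, add) := by
    have hemp : (PySem.Set.empty : PySem.Set String) = ([] : List String) := rfl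
    rw [hemp, heq]
    simp
  have haddv0 : ∀ p, p ∈ add ↔ p ∈ v0 := by
    intro p
    rw [hv0, mem_daddy]
    constructor
    · intro hp; exact (h1 p hp).2
    · rintro ⟨j, hj, hr⟩
      have := h2 j hj p hr
      simpa using this
  have htermB : pvIter G (G.length+1) add = [] :=
    pvIter_eq_nil_of_sub G _ (fun p hp => (haddv0 p).mp hp) hk
  have hB : ∀ z, z ∈ bfsLoop (pvRevAdj G) (G.length+2) add add ↔
      z ∈ add ∨ ∃ c ∈ add, Relation.TransGen (pvR G) c z :=
    bfsLoop_char G (G.length+2) add add (fun p hp => hp)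
      (fun x hx hxa _ _ => absurd hx hxa) ⟨G.length+1, by omega, htermB⟩
  have hsets : ∀ z, z ∈ climbLoopA (PySem.Dict.ofList G) (G.length+2) [] v0 ↔
      z ∈ bfsLoop (pvRevAdj G) (G.length+2) add add := by
    intro z
    rw [hA z, hB z]
    constructor
    · rintro ⟨c, hc, hrtg⟩
      rcases Relation.ReflTransGen.cases_head hrtg with rfl | ⟨y, hy, hrtg'⟩
      · exact Or.inl ((haddv0 _).mpr hc)
      · exact Or.inr ⟨c, (haddv0 c).mpr hc, Relation.TransGen.head' hy hrtg'⟩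
    · rintro (h | ⟨c, hc, htg⟩)
      · exact ⟨z, (haddv0 z).mp h, Relation.ReflTransGen.refl⟩
      · exact ⟨c, (haddv0 c).mp hc, htg.to_reflTransGen⟩
  have hn : Pathways.foldl (fun n t =>
        if t ∈ climbLoopA (PySem.Dict.ofList G) (G.length+2) [] v0 then n ++ t.toList ++ [','] else n) [] =
      ((Pathways.filter (fun t =>
        PySem.Set.contains (bfsLoop (pvRevAdj G) (G.length+2) add add) t)).map
          (fun t => t.toList ++ [','])).flatten := by
    have := strfold_eq Pathways _ _ hsets []
    simpa using this
  show _ = (let st := bfsRound (pvRevAdj G) (PySem.Set.empty, []) chars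
    let vset := bfsLoop (pvRevAdj G) (G.length + 2) st.1 st.2
    let n := pvRstripComma
      (((Pathways.filter (fun t => PySem.Set.contains vset t)).map (fun t => t.toList ++ [','])).flatten)
    match i.toList with
    | [] => D
    | c :: _ =>
      D.insert (String.singleton c)
        (if 0 < n.length then String.ofList (" is embeded in pathway(s) ".toList ++ n)
         else " is all alone."))
  rw [heq']
  show (let n := pvRstripComma (Pathways.foldl (fun n t =>
      if t ∈ climbLoopA (PySem.Dict.ofList G) (G.length+2) [] v0 then n ++ t.toList ++ [','] else n) [])
    match i.toList with
    | [] => D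
    | c :: _ =>
      if 0 < n.length then
        D.insert (String.singleton c) (String.ofList (" is embeded in pathway(s) ".toList ++ n))
      else
        D.insert (String.singleton c) " is all alone.") =
    (let n := pvRstripComma (((Pathways.filter (fun t =>
        PySem.Set.contains (bfsLoop (pvRevAdj G) (G.length+2) add add) t)).map
          (fun t => t.toList ++ [','])).flatten)
    match i.toList with
    | [] => D
    | c :: _ =>
      D.insert (String.singleton c)
        (if 0 < n.length then String.ofList (" is embeded in pathway(s) ".toList ++ n)
         else " is all alone."))
  rw [hn]
  cases hit : i.toList with
  | nil => rfl
  | cons c cs =>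
    simp only []
    by_cases hl : 0 < (pvRstripComma (((Pathways.filter (fun t =>
        PySem.Set.contains (bfsLoop (pvRevAdj G) (G.length+2) add add) t)).map
          (fun t => t.toList ++ [','])).flatten)).length
    · simp only [if_pos hl]
    · simp only [if_neg hl]

-- ===== VERDICT (by name: the statement is the Claim_ definition above) =====
theorem climb_the_tree_spec : Claim_equal_climb_the_tree := by
  unfold Claim_equal_climb_the_tree
  intro G Pathways _hDom hPre
  unfold Spec_climb_the_tree climb_the_tree climb_the_tree_alt
  exact congrArg PySem.Dict.items
    (PySem.List.foldl_congr_mem Pathways _ _ PySem.Dict.empty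
      (fun D i hi => per_path_eq G Pathways hPre i hi D))
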